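-- pv_equiv track=rewrite | github.com/suzheng/GeneRAIN_HM | src_mouse/data_m/get_homolo_mg.py | reverse_homolog_mapping
-- ===== SOURCE A (Python) =====
-- def reverse_homolog_mapping(homolog_dict):
--     """
--     Create a dictionary mapping mouse genes to lists of corresponding human homolog genes
--     based on an existing dictionary mapping human genes to mouse homologs.
--
--     Parameters:
--     homolog_dict (dict): A dictionary with human genes as keys and lists of mouse genes as values.
--
--     Returns:
--     dict: A dictionary with mouse genes as keys and lists of human genes as values.
--     """
--     mouse_to_human_dict = {}
--
--     # Iterate through each human gene and its corresponding mouse genes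
--     for human_gene, mouse_genes in homolog_dict.items():
--         for mouse_gene in mouse_genes:
--             # If the mouse gene isn't a key in the dictionary yet, add it
--             if mouse_gene not in mouse_to_human_dict:
--                 mouse_to_human_dict[mouse_gene] = [human_gene]
--             else:
--                 # Append the human gene to the existing list if it's not already included
--                 if human_gene not in mouse_to_human_dict[mouse_gene]:
--                     mouse_to_human_dict[mouse_gene].append(human_gene)
--
--     return mouse_to_human_dict
-- ===== SOURCE B (Python) =====
-- def reverse_homolog_mapping(homolog_dict):
--     # Gather instead of scatter: list the distinct mouse genes in first-occurrence
--     # order, then for each mouse gene scan the whole table for the human genes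
--     # whose homolog list contains it.
--     items = list(homolog_dict.items())
--     order = list(dict.fromkeys(m for _, ms in items for m in ms))
--     return {m: list(dict.fromkeys(h for h, ms in items if m in ms)) for m in order}
-- ===== Notes on version B (the rewrite author's own statement) =====
-- stated objective: alternative
-- what changed: B inverts the mapping by gathering instead of scattering: it first computes the distinct mouse genes in first-occurrence order, then for each mouse gene re-scans the whole table collecting the human genes whose homolog list contains it, instead of A's single streaming pass that inserts into / appends to a growing dict with a membership test per pair.
import Mathlib
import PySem

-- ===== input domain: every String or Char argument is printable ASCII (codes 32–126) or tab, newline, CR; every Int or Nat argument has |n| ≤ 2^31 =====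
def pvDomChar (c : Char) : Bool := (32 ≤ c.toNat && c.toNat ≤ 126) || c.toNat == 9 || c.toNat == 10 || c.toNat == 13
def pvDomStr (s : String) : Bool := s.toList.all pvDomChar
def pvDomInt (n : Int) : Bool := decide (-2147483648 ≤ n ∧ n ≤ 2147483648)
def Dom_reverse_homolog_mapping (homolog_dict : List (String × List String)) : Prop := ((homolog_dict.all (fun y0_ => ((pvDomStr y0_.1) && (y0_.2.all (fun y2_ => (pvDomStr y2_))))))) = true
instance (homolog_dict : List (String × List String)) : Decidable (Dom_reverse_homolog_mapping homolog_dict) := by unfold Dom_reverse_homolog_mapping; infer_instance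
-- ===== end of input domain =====

-- B inverts the mapping by GATHERING instead of A's streaming SCATTER: it lists the distinct
-- mouse genes in first-occurrence order and then, per mouse gene, re-scans the whole table
-- for the human genes whose homolog list contains it (alternative algorithm, not faster).

-- ===== PORT A =====
def reverse_homolog_mapping (homolog_dict : List (String × List String)) : List (String × List String) :=
  (homolog_dict.foldl (fun d p =>
      p.2.foldl (fun d m =>
        if d.contains m = false then
          d.insert m [p.1]
        else if p.1 ∉ d.getD m [] then
          d.modify m [] (fun v => v ++ [p.1])
        else d) d)
    PySem.Dict.empty).items

-- ===== PORT B =====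
def reverse_homolog_mapping_alt (homolog_dict : List (String × List String)) : List (String × List String) :=
  let order := PySem.List.dedup (homolog_dict.flatMap (fun p => p.2))
  order.map (fun m =>
    (m, PySem.List.dedup ((homolog_dict.filter (fun p => p.2.contains m)).map (fun p => p.1))))

-- ===== PRECONDITION & SPEC =====
def Spec_reverse_homolog_mapping (homolog_dict : List (String × List String)) (out : List (String × List String)) : Prop := out = reverse_homolog_mapping_alt homolog_dict
instance (homolog_dict : List (String × List String)) (out : List (String × List String)) : Decidable (Spec_reverse_homolog_mapping homolog_dict out) := by unfold Spec_reverse_homolog_mapping; infer_instance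

-- ===== CLAIM (what is proved, stated in full; the proofs are below) =====
def Claim_equal_reverse_homolog_mapping : Prop := ∀ (homolog_dict : List (String × List String)), Dom_reverse_homolog_mapping homolog_dict → Spec_reverse_homolog_mapping homolog_dict (reverse_homolog_mapping homolog_dict)

-- ===== LEMMAS AND PROOFS =====

-- the distinct mouse genes of a prefix, in first-occurrence order
def pvKeys (L : List (String × List String)) : List String :=
  PySem.List.dedup (L.flatMap (fun p => p.2))

-- the human genes of a prefix whose homolog list contains m, duplicates included
def pvHum (L : List (String × List String)) (m : String) : List String :=
  (L.filter (fun p => p.2.contains m)).map (fun p => p.1)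

def pvVal (L : List (String × List String)) (m : String) : List String :=
  PySem.List.dedup (pvHum L m)

-- A's dictionary after processing the prefix L, in closed form
def pvIdeal (L : List (String × List String)) : PySem.Dict String (List String) :=
  PySem.Dict.mk ((pvKeys L).map (fun m => (m, pvVal L m)))

theorem pvDedup_append_singleton (v : List String) (h : String) :
    PySem.List.dedup (v ++ [h]) =
      if h ∈ v then PySem.List.dedup v else PySem.List.dedup v ++ [h] := by
  simp only [PySem.List.dedup_eq_ofList, PySem.Set.ofList_append, PySem.Set.update_cons,
    PySem.Set.update_nil, PySem.Set.add]
  by_cases hm : h ∈ v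
  · rw [if_pos, if_pos hm]
    simpa [PySem.Set.contains] using (PySem.Set.mem_ofList v h).mpr hm
  · rw [if_neg, if_neg hm]
    simpa [PySem.Set.contains] using fun hx => hm ((PySem.Set.mem_ofList v h).mp hx)

theorem pvKeys_append (l : List (String × List String)) (h : String) (ms : List String) :
    pvKeys (l ++ [(h, ms)]) = PySem.List.dedup (l.flatMap (fun p => p.2) ++ ms) := by
  simp [pvKeys]

theorem pvHum_append (l : List (String × List String)) (h : String) (ms : List String)
    (k : String) :
    pvHum (l ++ [(h, ms)]) k = pvHum l k ++ (if ms.contains k then [h] else []) := by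
  simp only [pvHum, List.filter_append, List.map_append]
  by_cases hc : k ∈ ms <;> simp [List.filter, hc]

theorem pvItems_ideal (L : List (String × List String)) :
    (pvIdeal L).items = (pvKeys L).map (fun m => (m, pvVal L m)) := rfl

theorem pvKeys_ideal (L : List (String × List String)) :
    (pvIdeal L).keys = pvKeys L := by
  simp [pvIdeal, PySem.Dict.keys, List.map_map, Function.comp_def]

theorem pvNodup_ideal (L : List (String × List String)) :
    (pvIdeal L).keys.Nodup := by
  rw [pvKeys_ideal]
  exact PySem.List.nodup_dedup _

theorem pvContains_ideal (L : List (String × List String)) (m : String) :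
    (pvIdeal L).contains m = decide (m ∈ L.flatMap (fun p => p.2)) := by
  rw [PySem.Dict.contains_eq_decide_mem_keys, pvKeys_ideal]
  simp [pvKeys]

theorem pvGetD_ideal (L : List (String × List String)) (m : String)
    (hm : m ∈ pvKeys L) :
    (pvIdeal L).getD m [] = pvVal L m := by
  apply PySem.Dict.getD_of_mem_items _ _ (pvNodup_ideal L)
  rw [pvItems_ideal]
  exact List.mem_map.mpr ⟨m, hm, rfl⟩

theorem pvMem_flat_of_hum (l : List (String × List String)) (m : String)
    (h : pvHum l m ≠ []) : m ∈ l.flatMap (fun p => p.2) := by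
  rcases List.exists_mem_of_ne_nil _ h with ⟨x, hx⟩
  rcases List.mem_map.mp hx with ⟨p, hp, -⟩
  rcases List.mem_filter.mp hp with ⟨hpl, hpc⟩
  exact List.mem_flatMap.mpr ⟨p, hpl, List.mem_of_elem_eq_true hpc⟩

-- the one-pair step of A maps pvIdeal of a partial entry to pvIdeal of the extended entry
theorem pvStep (l : List (String × List String)) (h : String) (ms₁ : List String)
    (m : String) :
    (if (pvIdeal (l ++ [(h, ms₁)])).contains m = false then
        (pvIdeal (l ++ [(h, ms₁)])).insert m [h]
      else if h ∉ (pvIdeal (l ++ [(h, ms₁)])).getD m [] then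
        (pvIdeal (l ++ [(h, ms₁)])).modify m [] (fun v => v ++ [h])
      else pvIdeal (l ++ [(h, ms₁)]))
    = pvIdeal (l ++ [(h, ms₁ ++ [m])]) := by
  set L := l ++ [(h, ms₁)] with hL
  have hkeys' : pvKeys (l ++ [(h, ms₁ ++ [m])]) =
      if m ∈ l.flatMap (fun p => p.2) ++ ms₁ then pvKeys L
      else pvKeys L ++ [m] := by
    rw [pvKeys_append, ← List.append_assoc, pvDedup_append_singleton, hL, pvKeys_append]
  have hval_ne : ∀ k, k ≠ m → pvVal (l ++ [(h, ms₁ ++ [m])]) k = pvVal L k := by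
    intro k hk
    have : (ms₁ ++ [m]).contains k = ms₁.contains k := by
      simp
      exact fun hkm => absurd hkm hk
    rw [pvVal, pvHum_append, this, hL, pvVal, pvHum_append]
  by_cases hmem : m ∈ l.flatMap (fun p => p.2) ++ ms₁
  · -- m already a key
    have hcont : (pvIdeal L).contains m = true := by
      rw [pvContains_ideal]
      simp only [hL, List.flatMap_append]
      simpa using hmem
    rw [if_neg (by simp [hcont])]
    have hmk : m ∈ pvKeys L := by
      rw [hL, pvKeys_append, PySem.List.mem_dedup]; exact hmem
    rw [pvGetD_ideal L m hmk]
    have hhum' : pvHum (l ++ [(h, ms₁ ++ [m])]) m = pvHum l m ++ [h] := by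
      rw [pvHum_append, if_pos (by simp)]
    by_cases hms : m ∈ ms₁
    · -- the current entry already contributed h for m
      have hhumL : pvHum L m = pvHum l m ++ [h] := by
        rw [hL, pvHum_append, if_pos (by simpa using hms)]
      have hin : h ∈ pvVal L m := by
        rw [pvVal, hhumL, PySem.List.mem_dedup]; simp
      rw [if_neg (by simpa using hin)]
      apply PySem.Dict.ext
      rw [pvItems_ideal, pvItems_ideal, hkeys', if_pos hmem]
      apply List.map_congr_left
      intro k hk
      rcases eq_or_ne k m with rfl | hkm
      · simp only [pvVal]
        rw [hhumL, hhum']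
      · rw [hval_ne k hkm]
    · -- m comes only from earlier entries
      have hhumL : pvHum L m = pvHum l m := by
        rw [hL, pvHum_append, if_neg (by simpa using hms)]; simp
      by_cases hh : h ∈ pvVal L m
      · rw [if_neg (by simpa using hh)]
        apply PySem.Dict.ext
        rw [pvItems_ideal, pvItems_ideal, hkeys', if_pos hmem]
        apply List.map_congr_left
        intro k hk
        rcases eq_or_ne k m with rfl | hkm
        · have hhl : h ∈ pvHum l k := by
            rw [pvVal, hhumL, PySem.List.mem_dedup] at hh; exact hh
          simp only [pvVal]
          rw [hhum', pvDedup_append_singleton, if_pos hhl, hhumL]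
        · rw [hval_ne k hkm]
      · rw [if_pos (by simpa using hh)]
        have hhl : h ∉ pvHum l m := by
          rw [pvVal, hhumL, PySem.List.mem_dedup] at hh; exact hh
        simp only [PySem.Dict.modify, pvGetD_ideal L m hmk]
        apply PySem.Dict.ext
        rw [PySem.Dict.items_insert_of_contains _ _ hcont, pvItems_ideal, pvItems_ideal,
          hkeys', if_pos hmem, List.map_map]
        apply List.map_congr_left
        intro k hk
        rcases eq_or_ne k m with rfl | hkm
        · simp only [Function.comp_def, beq_self_eq_true, if_pos]
          simp only [pvVal]
          rw [hhum', pvDedup_append_singleton, if_neg hhl, hhumL]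
        · have hb : (k == m) = false := by simpa using hkm
          simp only [Function.comp_def, hb, Bool.false_eq_true, if_false]
          rw [hval_ne k hkm]
  · -- m is a fresh key: insert
    have hcont : (pvIdeal L).contains m = false := by
      rw [pvContains_ideal]
      simp only [hL, List.flatMap_append]
      simpa using hmem
    rw [if_pos hcont]
    apply PySem.Dict.ext
    rw [PySem.Dict.items_insert_of_not_contains _ _ hcont, pvItems_ideal, pvItems_ideal,
      hkeys', if_neg hmem, List.map_append]
    congr 1
    · apply List.map_congr_left
      intro k hk
      have hkm : k ≠ m := by
        rintro rfl
        exact hmem ((PySem.List.mem_dedup _ _).mp (by rwa [hL, pvKeys_append] at hk))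
      rw [hval_ne k hkm]
    · -- the new key's value is [h]
      have hml : m ∉ l.flatMap (fun p => p.2) := fun hx => hmem (List.mem_append.mpr (Or.inl hx))
      have hlnil : pvHum l m = [] := by
        by_contra hne
        exact hml (pvMem_flat_of_hum l m hne)
      have : pvVal (l ++ [(h, ms₁ ++ [m])]) m = [h] := by
        rw [pvVal, pvHum_append, if_pos (by simp), hlnil]
        simp [PySem.List.dedup, PySem.Set.ofList, PySem.Set.add, PySem.Set.contains]
      simp [this]

-- the inner loop over the rest of an entry's mouse list
theorem pvInner (ms₂ ms₁ : List String) (h : String) (l : List (String × List String)) :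
    ms₂.foldl (fun d m =>
        if d.contains m = false then d.insert m [h]
        else if h ∉ d.getD m [] then d.modify m [] (fun v => v ++ [h])
        else d) (pvIdeal (l ++ [(h, ms₁)]))
      = pvIdeal (l ++ [(h, ms₁ ++ ms₂)]) := by
  induction ms₂ generalizing ms₁ with
  | nil => simp
  | cons m ms₂ ih =>
      simp only [List.foldl_cons]
      rw [pvStep l h ms₁ m, ih (ms₁ ++ [m])]
      simp

theorem pvIdeal_append_nil (l : List (String × List String)) (h : String) :
    pvIdeal (l ++ [(h, [])]) = pvIdeal l := by
  apply PySem.Dict.ext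
  rw [pvItems_ideal, pvItems_ideal, pvKeys_append]
  have hkeys : PySem.List.dedup (l.flatMap (fun p => p.2) ++ []) = pvKeys l := by
    simp [pvKeys]
  rw [hkeys]
  apply List.map_congr_left
  intro k hk
  rw [pvVal, pvHum_append]
  simp [pvVal]

theorem pvOuter (l₂ l₁ : List (String × List String)) :
    l₂.foldl (fun d p =>
        p.2.foldl (fun d m =>
          if d.contains m = false then d.insert m [p.1]
          else if p.1 ∉ d.getD m [] then d.modify m [] (fun v => v ++ [p.1])
          else d) d) (pvIdeal l₁)
      = pvIdeal (l₁ ++ l₂) := by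
  induction l₂ generalizing l₁ with
  | nil => simp
  | cons p l₂ ih =>
      simp only [List.foldl_cons]
      rw [← pvIdeal_append_nil l₁ p.1, pvInner p.2 [] p.1 l₁]
      simp only [List.nil_append]
      rw [ih (l₁ ++ [(p.1, p.2)])]
      simp

-- ===== VERDICT (by name: the statement is the Claim_ definition above) =====
theorem reverse_homolog_mapping_spec : Claim_equal_reverse_homolog_mapping := by
  intro hd _
  show reverse_homolog_mapping hd = reverse_homolog_mapping_alt hd
  unfold reverse_homolog_mapping
  have h0 : (PySem.Dict.empty : PySem.Dict String (List String)) = pvIdeal [] := rfl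
  rw [h0, pvOuter hd []]
  rfl
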